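-- pv_equiv track=rewrite | github.com/0xamitr/a | monkeybana.py | monkey_banana
-- ===== SOURCE A (Python) =====
-- def monkey_banana(rows, cols, bananas):
--     table = [[0 for _ in range(cols)] for _ in range(rows)]
--
--     for banana in bananas:
--         row, col, value = banana
--         table[row - 1][col - 1] = value
--
--     # Dynamic programming to find the maximum number of bananas the monkey can collect
--     for i in range(rows - 1, -1, -1):
--         for j in range(cols):
--             from_above = table[i + 1][j] if i + 1 < rows else 0
--             from_right = table[i][j - 1] if j - 1 >= 0 else 0
--             table[i][j] += max(from_above, from_right)
--
--     return table[0][cols // 2]  # Max bananas collected at the starting position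
-- ===== SOURCE B (Python) =====
-- def monkey_banana(rows, cols, bananas):
--     table = [[0 for _ in range(cols)] for _ in range(rows)]
--
--     for banana in bananas:
--         row, col, value = banana
--         table[row - 1][col - 1] = value
--
--     # Each row is reduced to a best-entry-column problem: the value at (i, j)
--     # equals prefix_sum(i, 0..j) + max(0, max_{k<=j}(below[k] - prefix_sum(i, 0..k-1))),
--     # computed with one running prefix sum and one running maximum per row
--     # (Kadane-style), instead of a per-cell max of two neighbours.
--     below = [0] * cols
--     for i in range(rows - 1, -1, -1):
--         run = 0      # sum of this row's cells strictly left of j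
--         best = 0     # max of 0 and (below[k] - prefix before k) over k <= j
--         cur = []
--         for j in range(cols):
--             best = max(best, below[j] - run)
--             run += table[i][j]
--             cur.append(run + best)
--         below = cur
--     return below[cols // 2]
-- ===== Notes on version B (the rewrite author's own statement) =====
-- stated objective: alternative
-- what changed: A fills the whole rows x cols table in place with the per-cell recurrence table[i][j] += max(from_above, from_right); B eliminates that two-neighbour max entirely: it unrolls each row into a best-entry-column maximisation, cell value = row prefix sum + running max of (below[k] - prefix before k), computed Kadane-style with one running sum and one running max per row over a single 1-D array.
import Mathlib
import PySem

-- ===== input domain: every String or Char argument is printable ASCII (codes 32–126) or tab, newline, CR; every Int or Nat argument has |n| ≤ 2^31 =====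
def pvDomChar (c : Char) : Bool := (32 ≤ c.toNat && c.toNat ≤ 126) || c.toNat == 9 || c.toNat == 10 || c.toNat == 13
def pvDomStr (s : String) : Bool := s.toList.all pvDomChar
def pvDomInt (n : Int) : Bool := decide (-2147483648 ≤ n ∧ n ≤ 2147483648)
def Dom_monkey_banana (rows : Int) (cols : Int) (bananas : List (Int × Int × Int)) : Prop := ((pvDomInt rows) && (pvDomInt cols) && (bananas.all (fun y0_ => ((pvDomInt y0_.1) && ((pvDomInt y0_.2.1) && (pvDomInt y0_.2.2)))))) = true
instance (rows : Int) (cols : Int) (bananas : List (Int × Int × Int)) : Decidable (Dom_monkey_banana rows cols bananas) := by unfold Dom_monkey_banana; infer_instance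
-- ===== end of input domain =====

-- B drops A's per-cell max(from_above, from_right) table update: it unrolls each row into a
-- best-entry-column maximisation (prefix sum + running max, Kadane-style) over a single 1-D array.

-- ===== PORT A =====
-- shared by both ports: the grid-construction loop, written identically in Source A and Source B
def buildTable (rows : Int) (cols : Int) (bananas : List (Int × Int × Int)) : List (List Int) :=
  bananas.foldl
    (fun table banana =>
      PySem.List.pySetD table (banana.1 - 1)
        (PySem.List.pySetD (PySem.List.pyGetD table (banana.1 - 1) []) (banana.2.1 - 1) banana.2.2))
    ((PySem.List.pyRange 0 rows 1).map (fun _ => (PySem.List.pyRange 0 cols 1).map (fun _ => (0 : Int))))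

-- body of A's inner DP loop: one in-place cell update of the 2-D table
def dpCellA (rows : Int) (table : List (List Int)) (i : Int) (j : Int) : List (List Int) :=
  let from_above := if i + 1 < rows then PySem.List.pyGetD (PySem.List.pyGetD table (i + 1) []) j 0 else 0
  let from_right := if 0 ≤ j - 1 then PySem.List.pyGetD (PySem.List.pyGetD table i []) (j - 1) 0 else 0
  PySem.List.pySetD table i
    (PySem.List.pySetD (PySem.List.pyGetD table i []) j
      (PySem.List.pyGetD (PySem.List.pyGetD table i []) j 0 + max from_above from_right))

-- A's inner loop: for j in range(cols)
def dpRowA (rows : Int) (cols : Int) (table : List (List Int)) (i : Int) : List (List Int) :=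
  (PySem.List.pyRange 0 cols 1).foldl (fun table j => dpCellA rows table i j) table

def monkey_banana (rows : Int) (cols : Int) (bananas : List (Int × Int × Int)) : Int :=
  let table := buildTable rows cols bananas
  let table := (PySem.List.pyRange (rows - 1) (-1) (-1)).foldl (fun table i => dpRowA rows cols table i) table
  PySem.List.pyGetD (PySem.List.pyGetD table 0 []) (PySem.Int.floordiv cols 2) 0

-- ===== PORT B =====
-- body of B's inner loop: update (run, best, cur) at column j of row i
def dpStepB (table : List (List Int)) (below : List Int) (i : Int) (st : Int × Int × List Int) (j : Int) : Int × Int × List Int :=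
  let best := max st.2.1 (PySem.List.pyGetD below j 0 - st.1)
  let run := st.1 + PySem.List.pyGetD (PySem.List.pyGetD table i []) j 0
  (run, best, st.2.2 ++ [run + best])

-- B's inner loop: for j in range(cols), building row i's values from `below`
def dpRowB (cols : Int) (table : List (List Int)) (below : List Int) (i : Int) : List Int :=
  ((PySem.List.pyRange 0 cols 1).foldl (fun st j => dpStepB table below i st j) (0, 0, [])).2.2

def monkey_banana_alt (rows : Int) (cols : Int) (bananas : List (Int × Int × Int)) : Int :=
  let table := buildTable rows cols bananas
  let below :=
    (PySem.List.pyRange (rows - 1) (-1) (-1)).foldl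
      (fun below i => dpRowB cols table below i)
      (PySem.List.pyRepeat [(0 : Int)] cols)
  PySem.List.pyGetD below (PySem.Int.floordiv cols 2) 0

-- ===== PRECONDITION & SPEC =====
-- Pre_ is exactly where A returns: rows ≥ 1, cols ≥ 1 and every banana's (row-1, col-1)
-- a valid (possibly negative, Python-wrapping) index; everywhere else A raises IndexError.
def Pre_monkey_banana (rows : Int) (cols : Int) (bananas : List (Int × Int × Int)) : Prop :=
  1 ≤ rows ∧ 1 ≤ cols ∧
    ∀ b ∈ bananas, (1 - rows ≤ b.1 ∧ b.1 ≤ rows) ∧ (1 - cols ≤ b.2.1 ∧ b.2.1 ≤ cols)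
instance (rows : Int) (cols : Int) (bananas : List (Int × Int × Int)) : Decidable (Pre_monkey_banana rows cols bananas) := by unfold Pre_monkey_banana; infer_instance

def pvWitness_monkey_banana : Int × Int × (List (Int × Int × Int)) := (2, 3, [(1, 2, 5), (2, 1, 4)])

def Spec_monkey_banana (rows : Int) (cols : Int) (bananas : List (Int × Int × Int)) (out : Int) : Prop := out = monkey_banana_alt rows cols bananas
instance (rows : Int) (cols : Int) (bananas : List (Int × Int × Int)) (out : Int) : Decidable (Spec_monkey_banana rows cols bananas out) := by unfold Spec_monkey_banana; infer_instance

-- ===== CLAIM (what is proved, stated in full; the proofs are below) =====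
def Claim_equal_monkey_banana : Prop := ∀ (rows : Int) (cols : Int) (bananas : List (Int × Int × Int)), Dom_monkey_banana rows cols bananas → Pre_monkey_banana rows cols bananas → Spec_monkey_banana rows cols bananas (monkey_banana rows cols bananas)

-- ===== LEMMAS AND PROOFS =====

-- cell (i, j) of a table (0 when out of range)
def getT (T : List (List Int)) (i j : Nat) : Int :=
  PySem.List.pyGetD (PySem.List.pyGetD T (i : Int) []) (j : Int) 0

-- R rows, each of length C
def Shape (R C : Nat) (T : List (List Int)) : Prop :=
  T.length = R ∧ ∀ r ∈ T, r.length = C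

-- the recurrence both programs compute
def solveF (g : Nat → Nat → Int) (R : Nat) (i j : Nat) : Int :=
  g i j + max (if i + 1 < R then solveF g R (i + 1) j else 0)
              (if 0 < j then solveF g R i (j - 1) else 0)
termination_by (R - i, j)
decreasing_by
  · exact Prod.Lex.left _ _ (by omega)
  · exact Prod.Lex.right _ (by omega)

lemma pyIdx_lt {n : Nat} {i : Int} {k : Nat} (h : PySem.List.pyIdx? n i = some k) : k < n := by
  unfold PySem.List.pyIdx? at h
  split_ifs at h with h1 h2 h3 <;> simp at h <;> omega

-- the banana-placement step preserves the table's shape, for ANY Int indices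
lemma shape_step {R C : Nat} {T : List (List Int)} (h : Shape R C T) (a c : Int) (v : Int) :
    Shape R C (PySem.List.pySetD T a (PySem.List.pySetD (PySem.List.pyGetD T a []) c v)) := by
  obtain ⟨hlen, hrow⟩ := h
  cases hk : PySem.List.pyIdx? T.length a with
  | none =>
    simp [PySem.List.pySetD, PySem.List.pySet?, hk]
    exact ⟨hlen, hrow⟩
  | some k =>
    have hklt : k < T.length := pyIdx_lt hk
    have hget : PySem.List.pyGetD T a [] = T[k] := by
      simp [PySem.List.pyGetD, PySem.List.pyGet?, hk, List.getElem?_eq_getElem hklt]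
    have hset : PySem.List.pySetD T a (PySem.List.pySetD (PySem.List.pyGetD T a []) c v)
        = T.set k (PySem.List.pySetD T[k] c v) := by
      simp [PySem.List.pySetD, PySem.List.pySet?, hk, hget]
    rw [hset]
    constructor
    · simp [hlen]
    · intro r hr
      rcases List.mem_or_eq_of_mem_set hr with h | h
      · exact hrow r h
      · subst h
        rw [PySem.List.length_pySetD]
        exact hrow _ (List.getElem_mem hklt)

lemma shape_buildTable_aux {R C : Nat} (l : List (Int × Int × Int)) :
    ∀ T, Shape R C T →
      Shape R C (l.foldl (fun table banana =>
        PySem.List.pySetD table (banana.1 - 1)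
          (PySem.List.pySetD (PySem.List.pyGetD table (banana.1 - 1) []) (banana.2.1 - 1) banana.2.2)) T) := by
  induction l with
  | nil => intro T h; exact h
  | cons b l ih => intro T h; exact ih _ (shape_step h _ _ _)

lemma shape_buildTable (R C : Nat) (bananas : List (Int × Int × Int)) :
    Shape R C (buildTable (R : Int) (C : Int) bananas) := by
  apply shape_buildTable_aux
  constructor
  · simp [PySem.List.pyRange_zero_natCast]
  · intro r hr
    simp at hr
    obtain ⟨k, hk, rfl⟩ := hr
    simp

lemma row_len {R C : Nat} {T : List (List Int)} (h : Shape R C T) {m : Nat} (hm : m < R) :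
    (PySem.List.pyGetD T (m : Int) []).length = C := by
  have h1 := h.1
  rw [PySem.List.pyGetD_natCast]
  rw [List.getD_eq_getElem?_getD, List.getElem?_eq_getElem (by omega : m < T.length)]
  exact h.2 _ (List.getElem_mem _)

lemma shape_update {R C : Nat} {T : List (List Int)} (h : Shape R C T) {m t : Nat} (hm : m < R) (_ht : t < C) (v : Int) :
    Shape R C (PySem.List.pySetD T (m : Int) (PySem.List.pySetD (PySem.List.pyGetD T (m : Int) []) (t : Int) v)) := by
  rw [PySem.List.pySetD_natCast]
  refine ⟨by simp [h.1], ?_⟩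
  intro r hr
  rcases List.mem_or_eq_of_mem_set hr with hh | hh
  · exact h.2 r hh
  · subst hh; rw [PySem.List.length_pySetD]; exact row_len h hm

lemma getT_update {R C : Nat} {T : List (List Int)} (h : Shape R C T) {m t : Nat} (hm : m < R) (ht : t < C) (v : Int) (i j : Nat) :
    getT (PySem.List.pySetD T (m : Int) (PySem.List.pySetD (PySem.List.pyGetD T (m : Int) []) (t : Int) v)) i j
      = if i = m ∧ j = t then v else getT T i j := by
  unfold getT
  rw [PySem.List.pyGetD_pySetD_natCast _ m i _ _ (by rw [h.1]; omega)]
  by_cases hi : i = m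
  · subst hi
    rw [if_pos rfl, PySem.List.pyGetD_pySetD_natCast _ t j _ _ (by rw [row_len h hm]; omega)]
    by_cases hjt : j = t
    · simp [hjt]
    · simp [hjt]
  · simp [hi]

lemma cellA {R C : Nat} (g : Nat → Nat → Int) {m t : Nat} (hm : m < R) (htC : t < C)
    {T' : List (List Int)} (hs' : Shape R C T')
    (hv' : ∀ i j, i < R → j < C → getT T' i j =
      if m < i then solveF g R i j else if i = m ∧ j < t then solveF g R i j else g i j) :
    Shape R C (dpCellA (R : Int) T' (m : Int) (t : Int)) ∧
    (∀ i j, i < R → j < C → getT (dpCellA (R : Int) T' (m : Int) (t : Int)) i j =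
      if m < i then solveF g R i j else if i = m ∧ j < t + 1 then solveF g R i j else g i j) := by
  have habove : (if (m : Int) + 1 < (R : Int) then PySem.List.pyGetD (PySem.List.pyGetD T' ((m : Int) + 1) []) (t : Int) 0 else 0)
      = (if m + 1 < R then solveF g R (m + 1) t else 0) := by
    by_cases h : m + 1 < R
    · rw [if_pos (by exact_mod_cast h), if_pos h]
      have hc : ((m : Int) + 1) = ((m + 1 : Nat) : Int) := by push_cast; ring
      rw [hc]
      have := hv' (m+1) t h htC
      unfold getT at this
      rw [this, if_pos (by omega)]
    · rw [if_neg (by exact_mod_cast h), if_neg h]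
  have hright : (if (0 : Int) ≤ (t : Int) - 1 then PySem.List.pyGetD (PySem.List.pyGetD T' (m : Int) []) ((t : Int) - 1) 0 else 0)
      = (if 0 < t then solveF g R m (t - 1) else 0) := by
    by_cases h : 0 < t
    · rw [if_pos (by omega), if_pos h]
      have hc : ((t : Int) - 1) = ((t - 1 : Nat) : Int) := by omega
      rw [hc]
      have := hv' m (t-1) hm (by omega)
      unfold getT at this
      rw [this, if_neg (by omega), if_pos (by omega)]
    · rw [if_neg (by omega), if_neg h]
  have hcur : PySem.List.pyGetD (PySem.List.pyGetD T' (m : Int) []) (t : Int) 0 = g m t := by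
    have := hv' m t hm htC
    unfold getT at this
    rw [this, if_neg (by omega), if_neg (by omega)]
  have hbody : dpCellA (R : Int) T' (m : Int) (t : Int)
      = PySem.List.pySetD T' (m : Int)
          (PySem.List.pySetD (PySem.List.pyGetD T' (m : Int) []) (t : Int) (solveF g R m t)) := by
    unfold dpCellA
    rw [habove, hright, hcur]
    conv_rhs => rw [solveF]
  rw [hbody]
  refine ⟨shape_update hs' hm htC _, ?_⟩
  intro i j hi hj
  rw [getT_update hs' hm htC _ i j]
  by_cases hij : i = m ∧ j = t
  · rw [if_pos hij]
    obtain ⟨rfl, rfl⟩ := hij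
    rw [if_neg (by omega), if_pos (by omega)]
  · rw [if_neg hij, hv' i j hi hj]
    split_ifs with h1 h2 h3 <;> first | rfl | omega

lemma innerA {R C : Nat} (g : Nat → Nat → Int) {m : Nat} (hm : m < R) :
    ∀ (t : Nat), t ≤ C → ∀ T, Shape R C T →
    (∀ i j, i < R → j < C → getT T i j = if m < i then solveF g R i j else g i j) →
    Shape R C ((List.range t).foldl (fun tb (k : Nat) => dpCellA (R : Int) tb (m : Int) (k : Int)) T) ∧
    (∀ i j, i < R → j < C →
      getT ((List.range t).foldl (fun tb (k : Nat) => dpCellA (R : Int) tb (m : Int) (k : Int)) T) i j =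
        if m < i then solveF g R i j else if i = m ∧ j < t then solveF g R i j else g i j) := by
  intro t
  induction t with
  | zero =>
    intro _ T hs hv
    refine ⟨hs, ?_⟩
    intro i j hi hj
    simp only [List.range_zero, List.foldl_nil]
    rw [hv i j hi hj]
    split_ifs with h1 h2 <;> first | rfl | omega
  | succ t ih =>
    intro ht T hs hv
    obtain ⟨hs', hv'⟩ := ih (by omega) T hs hv
    rw [List.range_succ, List.foldl_append, List.foldl_cons, List.foldl_nil]
    exact cellA g hm (by omega) hs' hv'

lemma pyRange_down (R : Nat) :
    PySem.List.pyRange ((R : Int) - 1) (-1) (-1) = List.map (fun k : Nat => (k : Int)) (List.range R).reverse := by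
  unfold PySem.List.pyRange
  simp only [if_neg (by norm_num : ¬((-1 : Int) = 0)), if_neg (by norm_num : ¬((0:Int) < -1))]
  by_cases hR : R = 0
  · subst hR; simp
  · rw [if_pos (by omega : (-1 : Int) < (R : Int) - 1)]
    have hc : ((((R : Int) - 1) - (-1) + -(-1) - 1) / -(-1)).toNat = R := by norm_num
    rw [hc]
    apply List.ext_getElem
    · simp
    · intro n h1 h2
      rw [List.getElem_map, List.getElem_map, List.getElem_reverse, List.getElem_range, List.getElem_range]
      simp only [List.length_range] at h1 h2 ⊢
      simp at h1
      omega

lemma rowA {R C : Nat} (g : Nat → Nat → Int) {m : Nat} (hm : m < R) {T : List (List Int)}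
    (hs : Shape R C T)
    (hv : ∀ i j, i < R → j < C → getT T i j = if m < i then solveF g R i j else g i j) :
    Shape R C (dpRowA (R : Int) (C : Int) T (m : Int)) ∧
    (∀ i j, i < R → j < C → getT (dpRowA (R : Int) (C : Int) T (m : Int)) i j =
      if m ≤ i then solveF g R i j else g i j) := by
  unfold dpRowA
  rw [PySem.List.pyRange_zero_natCast, List.foldl_map]
  obtain ⟨hs', hv'⟩ := innerA g hm C (le_refl C) T hs hv
  refine ⟨hs', ?_⟩
  intro i j hi hj
  rw [hv' i j hi hj]
  split_ifs with h1 h2 h3 <;> first | rfl | omega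

lemma outerA {R C : Nat} (g : Nat → Nat → Int) :
    ∀ (m : Nat), m ≤ R → ∀ T, Shape R C T →
    (∀ i j, i < R → j < C → getT T i j = if m ≤ i then solveF g R i j else g i j) →
    (∀ i j, i < R → j < C →
      getT (((List.range m).reverse).foldl (fun tb (k : Nat) => dpRowA (R : Int) (C : Int) tb (k : Int)) T) i j
        = solveF g R i j) := by
  intro m
  induction m with
  | zero =>
    intro _ T hs hv i j hi hj
    simp only [List.range_zero, List.reverse_nil, List.foldl_nil]
    rw [hv i j hi hj, if_pos (by omega)]
  | succ m ih =>
    intro hm T hs hv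
    rw [List.range_succ, List.reverse_append, List.reverse_cons, List.reverse_nil, List.nil_append,
      List.cons_append, List.nil_append, List.foldl_cons]
    obtain ⟨hs', hv'⟩ := rowA g (by omega : m < R) hs (fun i j hi hj => by
      rw [hv i j hi hj]; split_ifs with h1 h2 <;> first | rfl | omega)
    exact ih (by omega) _ hs' hv'

lemma monkey_banana_eq (R C : Nat) (hR : 1 ≤ R) (hC : 1 ≤ C) (bananas : List (Int × Int × Int)) :
    monkey_banana (R : Int) (C : Int) bananas
      = solveF (fun i j => getT (buildTable (R : Int) (C : Int) bananas) i j) R 0 (C / 2) := by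
  simp only [monkey_banana, pyRange_down R, List.foldl_map]
  have hT0 := shape_buildTable R C bananas
  have h := outerA (C := C) (fun i j => getT (buildTable (R : Int) (C : Int) bananas) i j) R (le_refl R)
    (buildTable (R : Int) (C : Int) bananas) hT0
    (fun i j hi hj => by rw [if_neg (by omega)])
    0 (C / 2) (by omega) (by have := Nat.div_lt_self (by omega : 0 < C) (by omega : 1 < 2); omega)
  have hfl : PySem.Int.floordiv (C : Int) 2 = ((C / 2 : Nat) : Int) := by
    exact_mod_cast PySem.Int.floordiv_natCast C 2
  rw [hfl]
  have h0 : (0 : Int) = ((0 : Nat) : Int) := rfl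
  rw [h0]
  exact h

-- ===== B-side: closed forms for B's running prefix sum and running maximum =====

-- the row below, as B's recurrence sees it
def bvF (g : Nat → Nat → Int) (R i k : Nat) : Int := if i + 1 < R then solveF g R (i + 1) k else 0

-- B's running prefix sum: sum of g i t for t < m
def pfxF (g : Nat → Nat → Int) (i : Nat) : Nat → Int
  | 0 => 0
  | m + 1 => pfxF g i m + g i m

-- B's running maximum: max of 0 and (below[k] - prefix before k) over k < m
def bestF (g : Nat → Nat → Int) (R i : Nat) : Nat → Int
  | 0 => 0
  | m + 1 => max (bestF g R i m) (bvF g R i m - pfxF g i m)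

-- the unrolling identity: prefix sum + running max = the DP value of cell (i, m)
lemma rowClosed (g : Nat → Nat → Int) (R i : Nat) :
    ∀ m, pfxF g i (m + 1) + bestF g R i (m + 1) = solveF g R i m := by
  intro m
  induction m with
  | zero =>
    rw [solveF]
    simp only [pfxF, bestF, bvF]
    omega
  | succ m ih =>
    rw [solveF]
    have h1 : pfxF g i (m + 1 + 1) = pfxF g i (m + 1) + g i (m + 1) := rfl
    have h2 : bestF g R i (m + 1 + 1) = max (bestF g R i (m + 1)) (bvF g R i (m + 1) - pfxF g i (m + 1)) := rfl
    simp only [h1, h2, if_pos (Nat.succ_pos m), Nat.add_sub_cancel, bvF]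
    omega

-- B's inner fold computes exactly (pfx, best, the row's DP values)
lemma innerB {R C : Nat} (table : List (List Int)) (below : List Int) (i : Nat)
    (hb : ∀ k, k < C → PySem.List.pyGetD below (k : Int) 0 = bvF (fun a b => getT table a b) R i k) :
    ∀ m, m ≤ C →
      (List.range m).foldl (fun st (j : Nat) => dpStepB table below (i : Int) st (j : Int)) (0, 0, []) =
        (pfxF (fun a b => getT table a b) i m, bestF (fun a b => getT table a b) R i m,
          (List.range m).map (fun j => solveF (fun a b => getT table a b) R i j)) := by
  intro m
  induction m with
  | zero => intro _; rfl
  | succ m ih =>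
    intro hm
    rw [List.range_succ, List.foldl_append, List.foldl_cons, List.foldl_nil, ih (by omega)]
    have hval : pfxF (fun a b => getT table a b) i m + getT table i m
        + max (bestF (fun a b => getT table a b) R i m)
            (bvF (fun a b => getT table a b) R i m - pfxF (fun a b => getT table a b) i m)
        = solveF (fun a b => getT table a b) R i m := by
      have h := rowClosed (fun a b => getT table a b) R i m
      simp only [pfxF, bestF] at h
      omega
    simp only [dpStepB, hb m (by omega), List.map_append, List.map_cons, List.map_nil, pfxF, bestF]
    exact Prod.ext rfl (Prod.ext rfl (by rw [← hval]; rfl))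

lemma dpRowB_eq {R C : Nat} (table : List (List Int)) (below : List Int) (i : Nat)
    (hb : ∀ k, k < C → PySem.List.pyGetD below (k : Int) 0 = bvF (fun a b => getT table a b) R i k) :
    dpRowB (C : Int) table below (i : Int)
      = (List.range C).map (fun j => solveF (fun a b => getT table a b) R i j) := by
  unfold dpRowB
  rw [PySem.List.pyRange_zero_natCast, List.foldl_map, innerB table below i hb C (le_refl C)]

lemma pyGetD_map_range (C k : Nat) (hk : k < C) (f : Nat → Int) :
    PySem.List.pyGetD ((List.range C).map f) (k : Int) 0 = f k := by
  rw [PySem.List.pyGetD_natCast]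
  simp [List.getD_eq_getElem?_getD, hk]

lemma pyGetD_replicate (C k : Nat) (_hk : k < C) :
    PySem.List.pyGetD (PySem.List.pyRepeat [(0 : Int)] (C : Int)) (k : Int) 0 = 0 := by
  rw [PySem.List.pyRepeat_singleton, PySem.List.pyGetD_natCast]
  simp

lemma outerB {R C : Nat} (table : List (List Int)) :
    ∀ (m : Nat), m ≤ R → ∀ below : List Int,
    (∀ k, k < C → PySem.List.pyGetD below (k : Int) 0 =
      if m < R then solveF (fun a b => getT table a b) R m k else 0) →
    ∀ k, k < C →
      PySem.List.pyGetD (((List.range m).reverse).foldl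
          (fun b (n : Nat) => dpRowB (C : Int) table b (n : Int)) below) (k : Int) 0
        = if 0 < R then solveF (fun a b => getT table a b) R 0 k else 0 := by
  intro m
  induction m with
  | zero =>
    intro _ below hbv k hk
    simp only [List.range_zero, List.reverse_nil, List.foldl_nil]
    exact hbv k hk
  | succ m ih =>
    intro hm below hbv
    rw [List.range_succ, List.reverse_append, List.reverse_cons, List.reverse_nil, List.nil_append,
      List.cons_append, List.nil_append, List.foldl_cons]
    have hb : ∀ k, k < C → PySem.List.pyGetD below (k : Int) 0 = bvF (fun a b => getT table a b) R m k := by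
      intro k hk
      rw [hbv k hk]
      unfold bvF
      split_ifs with h1 <;> rfl
    rw [dpRowB_eq table below m hb]
    apply ih (by omega)
    intro k hk
    rw [pyGetD_map_range C k hk, if_pos (by omega)]

lemma monkey_banana_alt_eq (R C : Nat) (hR : 1 ≤ R) (hC : 1 ≤ C) (bananas : List (Int × Int × Int)) :
    monkey_banana_alt (R : Int) (C : Int) bananas
      = solveF (fun i j => getT (buildTable (R : Int) (C : Int) bananas) i j) R 0 (C / 2) := by
  simp only [monkey_banana_alt, pyRange_down R, List.foldl_map]
  have hdiv : C / 2 < C := Nat.div_lt_self (by omega) (by omega)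
  have h := outerB (C := C) (buildTable (R : Int) (C : Int) bananas) R (le_refl R)
    (PySem.List.pyRepeat [(0 : Int)] (C : Int))
    (fun k hk => by rw [pyGetD_replicate C k hk, if_neg (by omega)])
    (C / 2) hdiv
  rw [if_pos (by omega)] at h
  have hfl : PySem.Int.floordiv (C : Int) 2 = ((C / 2 : Nat) : Int) := by
    exact_mod_cast PySem.Int.floordiv_natCast C 2
  rw [hfl]
  exact h

-- ===== VERDICT (by name: the statement is the Claim_ definition above) =====
theorem monkey_banana_spec : Claim_equal_monkey_banana := by
  intro rows cols bananas _ hpre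
  obtain ⟨h1, h2, _⟩ := hpre
  obtain ⟨R, rfl⟩ : ∃ R : Nat, rows = (R : Int) := ⟨rows.toNat, by omega⟩
  obtain ⟨C, rfl⟩ : ∃ C : Nat, cols = (C : Int) := ⟨cols.toNat, by omega⟩
  unfold Spec_monkey_banana
  rw [monkey_banana_eq R C (by exact_mod_cast h1) (by exact_mod_cast h2) bananas,
    monkey_banana_alt_eq R C (by exact_mod_cast h1) (by exact_mod_cast h2) bananas]
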